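-- pv_equiv track=rewrite | github.com/Agususuariodegit/Algoritmos | guia7.py | divide_a_todos
-- ===== SOURCE A (Python) =====
-- def divide_a_todos(x:int, lista: list [int]) -> bool:
--     contador:int = 0
--     res:bool = True
--     divisores:int = 0
--     while (contador < len(lista)):
--         if (lista [contador] % x == 0):
--              divisores += 1
--              contador += 1
--         else:
--             contador += 1
--     if (divisores == len(lista)):
--         res = True
--     else:
--         res = False
--     return res
-- ===== SOURCE B (Python) =====
-- def _gcd(a, b):
--     a, b = abs(a), abs(b)
--     while b:
--         a, b = b, a % b
--     return a
--
-- def divide_a_todos(x: int, lista: list) -> bool: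
--     g = 0
--     for a in lista:
--         g = _gcd(g, a)
--     return g % x == 0
-- ===== Notes on version B (the rewrite author's own statement) =====
-- stated objective: alternative
-- what changed: Instead of counting how many elements are divisible by x and comparing the count to the length, B reduces the list to a single gcd g (Euclid's algorithm, starting from 0) and returns g % x == 0, using the identity that x divides every element iff x divides their gcd.
-- outside the precondition, e.g. on divide_a_todos(0, []): A returns True, B raises ZeroDivisionError
import Mathlib
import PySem

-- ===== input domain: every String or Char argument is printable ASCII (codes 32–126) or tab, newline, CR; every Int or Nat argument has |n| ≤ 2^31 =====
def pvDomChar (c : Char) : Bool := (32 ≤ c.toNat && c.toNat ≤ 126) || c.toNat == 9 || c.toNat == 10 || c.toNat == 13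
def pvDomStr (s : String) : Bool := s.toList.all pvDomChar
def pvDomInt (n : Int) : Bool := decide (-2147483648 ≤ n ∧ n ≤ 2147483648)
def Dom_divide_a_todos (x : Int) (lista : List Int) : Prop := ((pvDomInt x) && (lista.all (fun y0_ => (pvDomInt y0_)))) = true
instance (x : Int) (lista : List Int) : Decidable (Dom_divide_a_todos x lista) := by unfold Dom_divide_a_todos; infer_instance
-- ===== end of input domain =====

-- B replaces A's divisibility count with a single gcd reduction followed by one modulo (x divides all elements iff x divides their gcd); return-value equivalence for x ≠ 0.


-- ===== PORT A =====
-- while loop over contador, counting divisores; then compare divisores with len(lista)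
def divide_a_todos (x : Int) (lista : List Int) : Bool :=
  let divisores : Int :=
    lista.foldl (fun d a => if PySem.Int.mod a x == 0 then d + 1 else d) 0
  if divisores == (lista.length : Int) then true else false

-- ===== PORT B =====
-- Euclid's gcd on |a|, |b| (the hand-written _gcd of Source B); terminates since a % b < b
def pvGcdLoop (a b : Nat) : Nat :=
  if h : b = 0 then a else pvGcdLoop b (a % b)
termination_by b
decreasing_by exact Nat.mod_lt a (Nat.pos_of_ne_zero h)

def pvGcd (a b : Int) : Int := (pvGcdLoop a.natAbs b.natAbs : Int)

def divide_a_todos_alt (x : Int) (lista : List Int) : Bool :=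
  let g : Int := lista.foldl (fun g a => pvGcd g a) 0
  PySem.Int.mod g x == 0

-- ===== PRECONDITION & SPEC =====
-- Pre_ excludes x = 0: there A raises ZeroDivisionError on every nonempty list, and B raises on
-- every list — including the empty one, where A returns True (sole excluded input A returns on).
def Pre_divide_a_todos (x : Int) (lista : List Int) : Prop := x ≠ 0
instance (x : Int) (lista : List Int) : Decidable (Pre_divide_a_todos x lista) := by
  unfold Pre_divide_a_todos; infer_instance
def pvWitness_divide_a_todos : Int × List Int := (3, [3, 6, 9])

def Spec_divide_a_todos (x : Int) (lista : List Int) (out : Bool) : Prop := out = divide_a_todos_alt x lista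
instance (x : Int) (lista : List Int) (out : Bool) : Decidable (Spec_divide_a_todos x lista out) := by unfold Spec_divide_a_todos; infer_instance

-- ===== CLAIM (what is proved, stated in full; the proofs are below) =====
def Claim_equal_divide_a_todos : Prop := ∀ (x : Int) (lista : List Int), Dom_divide_a_todos x lista → Pre_divide_a_todos x lista → Spec_divide_a_todos x lista (divide_a_todos x lista)

-- ===== LEMMAS AND PROOFS =====

-- the hand-written Euclid loop computes Nat.gcd
theorem pvGcdLoop_eq (a b : Nat) : pvGcdLoop a b = Nat.gcd a b := by
  induction b using Nat.strong_induction_on generalizing a with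
  | _ b ih =>
    rw [pvGcdLoop.eq_def]
    by_cases h : b = 0
    · simp [h]
    · rw [dif_neg h, ih (a % b) (Nat.mod_lt a (Nat.pos_of_ne_zero h)) b]
      rw [Nat.gcd_comm, ← Nat.gcd_rec, Nat.gcd_comm]

theorem dvd_pvGcd_iff (x a b : Int) : x ∣ pvGcd a b ↔ x ∣ a ∧ x ∣ b := by
  rw [pvGcd, pvGcdLoop_eq, ← Int.natAbs_dvd, Int.natCast_dvd_natCast,
    Nat.dvd_gcd_iff, Int.natAbs_dvd_natAbs, Int.natAbs_dvd_natAbs]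

-- x divides the gcd fold iff it divides the seed and every element
theorem dvd_foldl_gcd (x : Int) (l : List Int) (g0 : Int) :
    (x ∣ l.foldl (fun g a => pvGcd g a) g0) ↔ x ∣ g0 ∧ ∀ a ∈ l, x ∣ a := by
  induction l generalizing g0 with
  | nil => simp
  | cons h t ih =>
    simp only [List.foldl_cons, ih, dvd_pvGcd_iff, List.mem_cons]
    constructor
    · rintro ⟨⟨hg, hh⟩, ht⟩
      exact ⟨hg, fun a ha => ha.elim (fun e => e ▸ hh) (ht a)⟩
    · rintro ⟨hg, hall⟩
      exact ⟨⟨hg, hall h (Or.inl rfl)⟩, fun a ha => hall a (Or.inr ha)⟩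

-- A's counting fold is the seed plus the number of divisible elements
theorem foldl_count (x : Int) (l : List Int) (d : Int) :
    l.foldl (fun d a => if PySem.Int.mod a x == 0 then d + 1 else d) d
      = d + (l.countP (fun a => PySem.Int.mod a x == 0) : Int) := by
  induction l generalizing d with
  | nil => simp
  | cons h t ih =>
    simp only [List.foldl_cons, List.countP_cons, ih]
    by_cases hc : PySem.Int.mod h x == 0 <;> simp [hc] <;> ring

-- ===== VERDICT (by name: the statement is the Claim_ definition above) =====
theorem divide_a_todos_spec : Claim_equal_divide_a_todos := by
  intro x lista _hdom _hpre
  unfold Spec_divide_a_todos divide_a_todos divide_a_todos_alt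
  by_cases hall : ∀ a ∈ lista, x ∣ a
  · have hg : PySem.Int.mod (lista.foldl (fun g a => pvGcd g a) 0) x = 0 :=
      (PySem.Int.mod_eq_zero_iff_dvd _ _).mpr
        ((dvd_foldl_gcd x lista 0).mpr ⟨dvd_zero x, hall⟩)
    have hcount : lista.countP (fun a => PySem.Int.mod a x == 0) = lista.length := by
      rw [List.countP_eq_length]
      intro a ha
      simpa [PySem.Int.mod_eq_zero_iff_dvd] using hall a ha
    rw [foldl_count, hcount]
    simp [hg]
  · have hg : PySem.Int.mod (lista.foldl (fun g a => pvGcd g a) 0) x ≠ 0 := by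
      intro h
      exact hall ((dvd_foldl_gcd x lista 0).mp
        ((PySem.Int.mod_eq_zero_iff_dvd _ _).mp h)).2
    have hcount : lista.countP (fun a => PySem.Int.mod a x == 0) ≠ lista.length := by
      intro h
      apply hall
      intro a ha
      have := (List.countP_eq_length).mp h a ha
      simpa [PySem.Int.mod_eq_zero_iff_dvd] using this
    have hci : ((lista.countP (fun a => PySem.Int.mod a x == 0) : Int)) ≠ (lista.length : Int) := by
      exact_mod_cast hcount
    rw [foldl_count]
    simp [hg, hci]
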